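-- pv_equiv track=rewrite | github.com/LYMingML/video2text | src/core/workspace.py | _is_final_output_file
-- ===== SOURCE A (Python) =====
-- OUTPUT_LANG_SUFFIXES = {"zh", "en", "ja", "ko", "es", "fr", "de", "ru"}
--
-- def _is_final_output_file(filename: str, file_prefix: str) -> bool:
--     allowed = {
--         f"{file_prefix}.srt",
--         f"{file_prefix}.txt",
--     }
--     for lang in OUTPUT_LANG_SUFFIXES:
--         allowed.add(f"{file_prefix}.{lang}.srt")
--         allowed.add(f"{file_prefix}.{lang}.txt")
--     return filename in allowed
-- ===== SOURCE B (Python) =====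
-- OUTPUT_LANG_SUFFIXES = {"zh", "en", "ja", "ko", "es", "fr", "de", "ru"}
--
-- def _is_final_output_file(filename: str, file_prefix: str) -> bool:
--     head = file_prefix + "."
--     if not filename.startswith(head):
--         return False
--     rest = filename[len(head):]
--     if rest in ("srt", "txt"):
--         return True
--     if rest.endswith(".srt") or rest.endswith(".txt"):
--         return rest[:-4] in OUTPUT_LANG_SUFFIXES
--     return False
-- ===== Notes on version B (the rewrite author's own statement) =====
-- stated objective: simpler
-- what changed: B checks the filename's structure directly (startswith file_prefix+'.', then the remainder is 'srt'/'txt' or a language from OUTPUT_LANG_SUFFIXES followed by '.srt'/'.txt') instead of materialising the 18-element set of allowed names and testing membership.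
import Mathlib
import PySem

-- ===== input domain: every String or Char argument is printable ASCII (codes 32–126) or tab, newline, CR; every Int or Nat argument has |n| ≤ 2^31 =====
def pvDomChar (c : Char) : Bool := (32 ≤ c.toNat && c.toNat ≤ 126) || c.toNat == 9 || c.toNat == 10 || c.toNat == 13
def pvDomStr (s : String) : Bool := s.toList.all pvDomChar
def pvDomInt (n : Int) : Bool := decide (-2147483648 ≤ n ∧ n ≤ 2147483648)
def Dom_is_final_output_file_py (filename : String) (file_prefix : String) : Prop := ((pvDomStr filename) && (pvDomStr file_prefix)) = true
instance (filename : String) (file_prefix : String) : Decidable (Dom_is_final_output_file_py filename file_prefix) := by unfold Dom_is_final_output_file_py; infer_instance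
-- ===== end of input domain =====

-- B parses the filename structurally (prefix test, extension test, language-segment lookup)
-- instead of enumerating the whole allowed set; objective: simpler/idiomatic.

-- module constant OUTPUT_LANG_SUFFIXES (a Python set), shared by the two ports
def OUTPUT_LANG_SUFFIXES : PySem.Set String :=
  PySem.Set.ofList ["zh", "en", "ja", "ko", "es", "fr", "de", "ru"]

-- ===== PORT A =====
-- allowed = {f"{file_prefix}.srt", f"{file_prefix}.txt"}; then for each lang add the two forms;
-- Python's set-iteration order is not modelled, but only membership in the built set is used,
-- which does not depend on the order the elements were added in.
def is_final_output_file_py (filename : String) (file_prefix : String) : Bool :=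
  let allowed : PySem.Set String :=
    PySem.Set.ofList [file_prefix ++ ".srt", file_prefix ++ ".txt"]
  let allowed :=
    OUTPUT_LANG_SUFFIXES.foldl
      (fun s lang =>
        PySem.Set.add (PySem.Set.add s (file_prefix ++ "." ++ lang ++ ".srt"))
          (file_prefix ++ "." ++ lang ++ ".txt"))
      allowed
  PySem.Set.contains allowed filename

-- ===== PORT B =====
def is_final_output_file_py_alt (filename : String) (file_prefix : String) : Bool :=
  let head := file_prefix ++ "."
  if !(PySem.Str.startswith filename head) then false
  else
    let rest := PySem.Str.slice filename (some (PySem.Str.len head)) none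
    if rest == "srt" || rest == "txt" then true
    else if PySem.Str.endswith rest ".srt" || PySem.Str.endswith rest ".txt" then
      PySem.Set.contains OUTPUT_LANG_SUFFIXES (PySem.Str.slice rest none (some (-4)))
    else false

-- ===== PRECONDITION & SPEC =====
def Spec_is_final_output_file_py (filename : String) (file_prefix : String) (out : Bool) : Prop := out = is_final_output_file_py_alt filename file_prefix
instance (filename : String) (file_prefix : String) (out : Bool) : Decidable (Spec_is_final_output_file_py filename file_prefix out) := by unfold Spec_is_final_output_file_py; infer_instance

-- ===== CLAIM (what is proved, stated in full; the proofs are below) =====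
def Claim_equal_is_final_output_file_py : Prop := ∀ (filename : String) (file_prefix : String), Dom_is_final_output_file_py filename file_prefix → Spec_is_final_output_file_py filename file_prefix (is_final_output_file_py filename file_prefix)

-- ===== LEMMAS AND PROOFS =====

-- propositional shape of the tail comparison: 2 plain extensions + 8 languages × 2 extensions
-- on the left vs the factored (extension ∨ extension) ∧ (language ∨ …) on the right
set_option maxHeartbeats 1000000 in
lemma pv_tail_logic (A B S1 S2 T1 T2 T3 T4 T5 T6 T7 T8 : Prop) :
    ((((((((((((((((A ∨ B) ∨ S1 ∧ T1) ∨ S2 ∧ T1) ∨ S1 ∧ T2) ∨ S2 ∧ T2) ∨ S1 ∧ T3) ∨ S2 ∧ T3) ∨ S1 ∧ T4) ∨ S2 ∧ T4) ∨ S1 ∧ T5) ∨ S2 ∧ T5) ∨ S1 ∧ T6) ∨ S2 ∧ T6) ∨ S1 ∧ T7) ∨ S2 ∧ T7) ∨ S1 ∧ T8) ∨ S2 ∧ T8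
    ↔ (A ∨ B) ∨ (S1 ∨ S2) ∧ (T1 ∨ T2 ∨ T3 ∨ T4 ∨ T5 ∨ T6 ∨ T7 ∨ T8) := by
  simp only [or_assoc]
  constructor
  · rintro (h | h | ⟨hs, ht⟩ | ⟨hs, ht⟩ | ⟨hs, ht⟩ | ⟨hs, ht⟩ | ⟨hs, ht⟩ | ⟨hs, ht⟩ | ⟨hs, ht⟩ | ⟨hs, ht⟩ | ⟨hs, ht⟩ | ⟨hs, ht⟩ | ⟨hs, ht⟩ | ⟨hs, ht⟩ | ⟨hs, ht⟩ | ⟨hs, ht⟩ | ⟨hs, ht⟩ | ⟨hs, ht⟩) <;> tauto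
  · rintro (h | h | ⟨hs | hs, (ht | ht | ht | ht | ht | ht | ht | ht)⟩) <;> tauto

-- r = x ++ s exactly when s is a suffix of r and stripping it leaves x
lemma pv_eq_append_iff_suffix (r x s : List Char) :
    r = x ++ s ↔ s <:+ r ∧ r.take (r.length - s.length) = x := by
  constructor
  · rintro rfl
    refine ⟨⟨x, rfl⟩, ?_⟩
    simp
  · rintro ⟨⟨e, rfl⟩, h⟩
    simp at h
    rw [h]

-- ===== VERDICT (by name: the statement is the Claim_ definition above) =====
set_option maxHeartbeats 1000000 in
theorem is_final_output_file_py_spec : Claim_equal_is_final_output_file_py := by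
  intro f p _
  unfold Spec_is_final_output_file_py
  have hL : OUTPUT_LANG_SUFFIXES = ["zh", "en", "ja", "ko", "es", "fr", "de", "ru"] := by decide
  rw [Bool.eq_iff_iff]
  simp only [is_final_output_file_py, is_final_output_file_py_alt, hL, List.foldl,
    PySem.Set.contains_iff, PySem.Set.mem_add, PySem.Set.mem_ofList, List.mem_cons,
    List.not_mem_nil, or_false, ← String.toList_inj, String.toList_append]
  have h1 : (".srt" : String).toList = ("." : String).toList ++ ("srt" : String).toList := by decide
  have h2 : (".txt" : String).toList = ("." : String).toList ++ ("txt" : String).toList := by decide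
  rw [h1, h2]
  simp only [← List.append_assoc]
  by_cases hsw : PySem.Str.startswith f (p ++ ".") = true
  · -- the filename does start with file_prefix + "."; write it as head ++ r
    have hb : (!(PySem.Str.startswith f (p ++ "."))) = false := by rw [hsw]; rfl
    rw [PySem.Str.startswith_eq, PySem.Chars.startswith_iff] at hsw
    obtain ⟨r, hr⟩ := hsw
    rw [String.toList_append] at hr
    have hrest : (PySem.Str.slice f (some (PySem.Str.len (p ++ "."))) none).toList = r := by
      rw [PySem.Str.toList_slice, PySem.Chars.slice_eq_listSlice, PySem.Str.len_eq,
        PySem.List.slice_from_natCast, ← hr, String.toList_append, List.drop_left]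
    rw [hb]
    simp only [Bool.false_eq_true, if_false, Bool.if_true_left, Bool.if_false_right,
      Bool.or_eq_true, Bool.and_eq_true, beq_iff_eq, PySem.Set.contains_iff,
      List.mem_cons, List.not_mem_nil, or_false, ← String.toList_inj, hrest,
      PySem.Str.endswith_eq, PySem.Chars.endswith_iff, PySem.Str.toList_slice,
      PySem.Chars.slice_eq_listSlice]
    rw [PySem.List.slice_to_neg_ofNat r 4 (by omega)]
    rw [← hr]
    simp only [List.append_assoc, List.append_right_inj]
    simp only [← h1, ← h2]
    have l1 : (".srt" : String).toList.length = 4 := by decide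
    have l2 : (".txt" : String).toList.length = 4 := by decide
    simp only [decide_eq_true_eq, pv_eq_append_iff_suffix, l1, l2]
    exact pv_tail_logic _ _ _ _ _ _ _ _ _ _ _ _
  · -- the filename does not start with file_prefix + "."; both sides are false
    have hsf : PySem.Str.startswith f (p ++ ".") = false := by
      cases h : PySem.Str.startswith f (p ++ ".") with
      | true => exact absurd h hsw
      | false => rfl
    have hb : (!(PySem.Str.startswith f (p ++ "."))) = true := by rw [hsf]; rfl
    have hnp : ¬ (p.toList ++ ("." : String).toList <+: f.toList) := by
      rw [← String.toList_append, ← PySem.Chars.startswith_iff, ← PySem.Str.startswith_eq, hsf]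
      simp
    rw [hb]
    simp only [if_true, Bool.false_eq_true, iff_false, or_assoc]
    rintro (h | h | h | h | h | h | h | h | h | h | h | h | h | h | h | h | h | h) <;>
      exact hnp (by rw [h]; simp)
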